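-- pv_equiv track=rewrite | github.com/cleandever/problem_solving | programmers/level2/영어 끝말잇기.py | solution
-- ===== SOURCE A (Python) =====
-- def solution(n, words):
--     seen_words = {}
--     for i, word in enumerate(words):
--         person_no = (i % n) + 1
--         loop_count = (i // n) + 1
--
--         # 끝말 잇기 조건 체크
--         if i > 0 and words[i-1][-1] != word[0]:
--             return [person_no, loop_count]
--
--         # 이전에 등장했던 단어 체크
--         if word in seen_words:
--             return [person_no, loop_count]
--
--         seen_words[word] = 0
--
--     return [0, 0]
-- ===== SOURCE B (Python) =====
-- def solution(n, words):
--     m = len(words)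
--     # first scan: index of the first duplicate word, else sentinel m
--     dup = m
--     seen = set()
--     for i, w in enumerate(words):
--         if w in seen:
--             dup = i
--             break
--         seen.add(w)
--     # second scan: a chain break can only matter before the first duplicate,
--     # so look for the first break only among pairs up to dup
--     idx = dup
--     for i in range(1, min(dup + 1, m)):
--         if words[i - 1][-1] != words[i][0]:
--             idx = i
--             break
--     if idx < m:
--         return [idx % n + 1, idx // n + 1]
--     return [0, 0]
-- ===== Notes on version B (the rewrite author's own statement) =====
-- stated objective: alternative
-- what changed: Replaces A's single fused early-return loop (dict of seen words + chain check per iteration) with two independent scans: first a set-based scan finding the first duplicate index, then a chain-break scan over adjacent pairs that only needs to look before that duplicate; the earlier of the two indices is turned into [person, round] arithmetically, with the list length as no-failure sentinel.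
import Mathlib
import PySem

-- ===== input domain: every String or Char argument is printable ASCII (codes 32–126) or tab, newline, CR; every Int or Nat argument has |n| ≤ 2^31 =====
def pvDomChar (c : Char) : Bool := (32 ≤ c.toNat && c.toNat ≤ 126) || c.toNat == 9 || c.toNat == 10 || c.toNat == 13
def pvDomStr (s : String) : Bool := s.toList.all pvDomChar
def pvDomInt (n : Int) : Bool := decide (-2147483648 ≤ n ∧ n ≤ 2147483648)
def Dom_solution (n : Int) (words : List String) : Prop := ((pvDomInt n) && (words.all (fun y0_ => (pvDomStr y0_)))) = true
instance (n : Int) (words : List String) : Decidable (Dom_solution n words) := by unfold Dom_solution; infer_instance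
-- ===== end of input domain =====

-- B replaces A's fused early-return loop by two separate scans (first-duplicate scan with a set,
-- then a chain-break scan over the pairs before that duplicate), combined arithmetically ("alternative").

-- ===== PORT A =====
-- the for-loop over enumerate(words) with dict seen_words and early returns
def solGoA (n : Int) (words : List String) (seen : PySem.Dict String Int) :
    List (Int × String) → List Int
  | [] => [0, 0]
  | (i, word) :: rest =>
    let person_no := PySem.Int.mod i n + 1
    let loop_count := PySem.Int.floordiv i n + 1
    -- 'words[i-1][-1] != word[0]' (raises IndexError on an empty word in Python: outside Pre_)
    if i > 0 ∧ (PySem.List.pyGet? words (i - 1)).bind (fun w => PySem.Str.pyGet? w (-1)) ≠ PySem.Str.pyGet? word 0 then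
      [person_no, loop_count]
    else if PySem.Dict.contains seen word then
      [person_no, loop_count]
    else
      solGoA n words (PySem.Dict.insert seen word 0) rest

def solution (n : Int) (words : List String) : List Int :=
  solGoA n words PySem.Dict.empty (PySem.List.enumerate words 0)

-- ===== PORT B =====
-- first scan: smallest index whose word was already seen, else sentinel m
def dupGoB (m : Int) (seen : PySem.Set String) : List (Int × String) → Int
  | [] => m
  | (i, w) :: rest =>
    if PySem.Set.contains seen w then i else dupGoB m (PySem.Set.add seen w) rest

-- second scan: 'for i in range(1, min(dup+1, m)): if words[i-1][-1] != words[i][0]: idx = i; break'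
def brkGoB (words : List String) (dflt : Int) : List Int → Int
  | [] => dflt
  | i :: rest =>
    if (PySem.List.pyGet? words (i - 1)).bind (fun w => PySem.Str.pyGet? w (-1)) ≠
       (PySem.List.pyGet? words i).bind (fun w => PySem.Str.pyGet? w 0) then i
    else brkGoB words dflt rest

def solution_alt (n : Int) (words : List String) : List Int :=
  let m : Int := words.length
  let dup := dupGoB m PySem.Set.empty (PySem.List.enumerate words 0)
  let idx := brkGoB words dup (PySem.List.pyRange 1 (min (dup + 1) m) 1)
  if idx < m then [PySem.Int.mod idx n + 1, PySem.Int.floordiv idx n + 1] else [0, 0]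

-- ===== PRECONDITION & SPEC =====
-- pvNoCrash words: every pair adjacent to an empty word is preceded (strictly) by a chain break
-- or a duplicate, so Python A (and B) return before indexing an empty string
def pvNoCrash (words : List String) : Bool :=
  (List.range words.length).all (fun j =>
    j == 0 ||
    (words.getD (j - 1) "" != "" && words.getD j "" != "") ||
    (List.range j).any (fun i =>
      decide (1 ≤ i) &&
      ((words.getD (i - 1) "" != "" && words.getD i "" != "" &&
        (words.getD (i - 1) "").toList.getLast? != (words.getD i "").toList.head?) ||
       (words.take i).contains (words.getD i ""))))

-- Pre_ excludes exactly the inputs on which Python A raises: n = 0 with nonempty words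
-- (ZeroDivisionError at i = 0), and lists where the game reaches a pair containing an empty
-- word (IndexError); on every other input A returns and B matches it (the ports totalize the
-- indexings via Option, identically on both sides, so the proved equality holds even there).
def Pre_solution (n : Int) (words : List String) : Prop :=
  (words = [] ∨ n ≠ 0) ∧ pvNoCrash words = true
instance (n : Int) (words : List String) : Decidable (Pre_solution n words) := by
  unfold Pre_solution; infer_instance

def pvWitness_solution : Int × List String := (2, ["ab", "ba", "ac"])

def Spec_solution (n : Int) (words : List String) (out : List Int) : Prop := out = solution_alt n words
instance (n : Int) (words : List String) (out : List Int) : Decidable (Spec_solution n words out) := by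
  unfold Spec_solution; infer_instance

-- ===== CLAIM (what is proved, stated in full; the proofs are below) =====
def Claim_equal_solution : Prop := ∀ (n : Int) (words : List String), Dom_solution n words → Pre_solution n words → Spec_solution n words (solution n words)

-- ===== LEMMAS AND PROOFS =====

theorem solGoA_cons (n : Int) (words : List String) (seen : PySem.Dict String Int)
    (i : Int) (word : String) (rest : List (Int × String)) :
    solGoA n words seen ((i, word) :: rest) =
      if i > 0 ∧ (PySem.List.pyGet? words (i - 1)).bind (fun w => PySem.Str.pyGet? w (-1)) ≠ PySem.Str.pyGet? word 0 then
        [PySem.Int.mod i n + 1, PySem.Int.floordiv i n + 1]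
      else if PySem.Dict.contains seen word then
        [PySem.Int.mod i n + 1, PySem.Int.floordiv i n + 1]
      else
        solGoA n words (PySem.Dict.insert seen word 0) rest := rfl

theorem dupGoB_cons (m i : Int) (w : String) (st : PySem.Set String) (rest : List (Int × String)) :
    dupGoB m st ((i, w) :: rest) =
      if PySem.Set.contains st w then i else dupGoB m (PySem.Set.add st w) rest := rfl

theorem brkGoB_cons (words : List String) (dflt i : Int) (rest : List Int) :
    brkGoB words dflt (i :: rest) =
      if (PySem.List.pyGet? words (i - 1)).bind (fun w => PySem.Str.pyGet? w (-1)) ≠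
         (PySem.List.pyGet? words i).bind (fun w => PySem.Str.pyGet? w 0) then i
      else brkGoB words dflt rest := rfl

-- the duplicate scan yields the sentinel or an index of its enumeration (≥ its start)
theorem dupGo_ge (suf : List String) : ∀ (k m : Int) (st : PySem.Set String),
    dupGoB m st (PySem.List.enumerate suf k) = m ∨ k ≤ dupGoB m st (PySem.List.enumerate suf k) := by
  induction suf with
  | nil => intro k m st; left; simp [dupGoB, PySem.List.enumerate_nil]
  | cons w suf ih =>
    intro k m st
    rw [PySem.List.enumerate_cons, dupGoB_cons]
    by_cases h : PySem.Set.contains st w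
    · right; rw [if_pos h]
    · rw [if_neg h]
      rcases ih (k + 1) m (PySem.Set.add st w) with h' | h'
      · left; exact h'
      · right; omega

theorem set_contains_add (st : PySem.Set String) (x y : String) :
    PySem.Set.contains (PySem.Set.add st x) y = (PySem.Set.contains st y || y == x) := by
  simp only [PySem.Set.add_eq_ite, PySem.Set.contains_eq_listContains]
  by_cases hxy : y = x
  · subst hxy; split_ifs with h <;> simp [h]
  · split_ifs with h <;> simp [hxy]

-- main invariant: A's fused loop, having consumed 'pre' (nonempty) with no failure, equals the
-- B-style answer: duplicate scan over the rest, chain-break scan over the pairs from here up to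
-- that duplicate, minimum turned into [person, round] against the length sentinel.
theorem mainLemma (n : Int) : ∀ (suf pre : List String)
    (seen : PySem.Dict String Int) (st : PySem.Set String),
    1 ≤ pre.length →
    (∀ x, PySem.Dict.contains seen x = PySem.Set.contains st x) →
    solGoA n (pre ++ suf) seen (PySem.List.enumerate suf (pre.length : Int)) =
      (if brkGoB (pre ++ suf) (dupGoB ((pre ++ suf).length : Int) st (PySem.List.enumerate suf (pre.length : Int)))
            (PySem.List.pyRange (pre.length : Int)
              (min (dupGoB ((pre ++ suf).length : Int) st (PySem.List.enumerate suf (pre.length : Int)) + 1) ((pre ++ suf).length : Int)) 1)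
          < ((pre ++ suf).length : Int) then
        [PySem.Int.mod (brkGoB (pre ++ suf) (dupGoB ((pre ++ suf).length : Int) st (PySem.List.enumerate suf (pre.length : Int)))
            (PySem.List.pyRange (pre.length : Int)
              (min (dupGoB ((pre ++ suf).length : Int) st (PySem.List.enumerate suf (pre.length : Int)) + 1) ((pre ++ suf).length : Int)) 1)) n + 1,
         PySem.Int.floordiv (brkGoB (pre ++ suf) (dupGoB ((pre ++ suf).length : Int) st (PySem.List.enumerate suf (pre.length : Int)))
            (PySem.List.pyRange (pre.length : Int)
              (min (dupGoB ((pre ++ suf).length : Int) st (PySem.List.enumerate suf (pre.length : Int)) + 1) ((pre ++ suf).length : Int)) 1)) n + 1]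
      else [0, 0]) := by
  intro suf
  induction suf with
  | nil =>
    intro pre seen st _ _
    simp only [List.append_nil, PySem.List.enumerate_nil, solGoA, dupGoB]
    rw [min_eq_right (by omega : ((pre.length : Int)) ≤ (pre.length : Int) + 1),
      PySem.List.pyRange_one_eq_nil (le_refl _)]
    simp [brkGoB]
  | cons w suf ih =>
    intro pre seen st hpre hmem
    have hk1 : (0 : Int) < (pre.length : Int) := by exact_mod_cast hpre
    have hkm : (pre.length : Int) < ((pre ++ w :: suf).length : Int) := by
      simp
    have hk1m : (pre.length : Int) + 1 ≤ ((pre ++ w :: suf).length : Int) := by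
      simp
    have hgetw : PySem.List.pyGet? (pre ++ w :: suf) ((pre.length : Int)) = some w := by
      rw [show ((pre.length : Int)) = ((pre.length : Nat) : Int) from rfl, PySem.List.pyGet?_natCast]
      simp
    -- A's chain condition at index pre.length coincides with B's brkGoB condition there
    have hcond : ((PySem.List.pyGet? (pre ++ w :: suf) ((pre.length : Int) - 1)).bind (fun v => PySem.Str.pyGet? v (-1)) ≠
        (PySem.List.pyGet? (pre ++ w :: suf) (pre.length : Int)).bind (fun v => PySem.Str.pyGet? v 0)) ↔
        ((PySem.List.pyGet? (pre ++ w :: suf) ((pre.length : Int) - 1)).bind (fun v => PySem.Str.pyGet? v (-1)) ≠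
        PySem.Str.pyGet? w 0) := by
      rw [hgetw]
      exact Iff.rfl
    rw [PySem.List.enumerate_cons, solGoA_cons, dupGoB_cons]
    by_cases hb : (PySem.List.pyGet? (pre ++ w :: suf) ((pre.length : Int) - 1)).bind (fun v => PySem.Str.pyGet? v (-1)) ≠ PySem.Str.pyGet? w 0
    · -- chain break (in option semantics) right here, at index pre.length
      rw [if_pos ⟨hk1, hb⟩]
      set d := (if PySem.Set.contains st w then (pre.length : Int)
        else dupGoB ((pre ++ w :: suf).length : Int) (PySem.Set.add st w) (PySem.List.enumerate suf ((pre.length : Int) + 1))) with hdef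
      have hD : d = ((pre ++ w :: suf).length : Int) ∨ (pre.length : Int) ≤ d := by
        rw [hdef]
        by_cases hc : PySem.Set.contains st w
        · right; rw [if_pos hc]
        · rw [if_neg hc]
          exact dupGo_ge suf ((pre.length : Int) + 1) _ _ |>.imp id (by omega)
      rw [PySem.List.pyRange_one_cons (by rcases hD with h | h <;> omega), brkGoB_cons,
        if_pos (hcond.mpr hb), if_pos hkm]
    · -- chain ok here in option semantics
      rw [if_neg (fun hco => hb hco.2)]
      by_cases hc : PySem.Set.contains st w
      · -- duplicate right here: the break scan inspects the single pair here and finds none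
        rw [if_pos (by rw [hmem]; exact hc), if_pos hc,
          min_eq_left (by omega : (pre.length : Int) + 1 ≤ ((pre ++ w :: suf).length : Int)),
          PySem.List.pyRange_one_singleton, brkGoB_cons, if_neg (fun h => hb (hcond.mp h))]
        simp only [brkGoB]
        rw [if_pos hkm]
      · -- no failure here: both sides step to index pre.length + 1
        rw [if_neg (by rw [hmem]; exact hc), if_neg hc]
        set d := dupGoB ((pre ++ w :: suf).length : Int) (PySem.Set.add st w) (PySem.List.enumerate suf ((pre.length : Int) + 1)) with hdef
        have hD : d = ((pre ++ w :: suf).length : Int) ∨ (pre.length : Int) + 1 ≤ d := by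
          rw [hdef]; exact dupGo_ge suf ((pre.length : Int) + 1) _ _
        rw [PySem.List.pyRange_one_cons (by rcases hD with h | h <;> omega), brkGoB_cons,
          if_neg (fun h => hb (hcond.mp h))]
        have hW : (pre ++ [w]) ++ suf = pre ++ w :: suf := by simp
        have hk : (((pre ++ [w]).length : Nat) : Int) = (pre.length : Int) + 1 := by simp
        have := ih (pre ++ [w]) (PySem.Dict.insert seen w 0) (PySem.Set.add st w)
          (by simp) (by
            intro x
            rw [PySem.Dict.contains_insert, set_contains_add, hmem, Bool.or_comm])
        rw [hW, hk] at this
        exact this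

theorem solution_eq (n : Int) (words : List String) : solution n words = solution_alt n words := by
  cases words with
  | nil =>
    show solGoA n [] PySem.Dict.empty (PySem.List.enumerate [] 0) = _
    simp only [solution_alt, PySem.List.enumerate_nil, solGoA, dupGoB, List.length_nil,
      Nat.cast_zero]
    rw [PySem.List.pyRange_one_eq_nil (by omega)]
    simp [brkGoB]
  | cons w0 ws =>
    show solGoA n (w0 :: ws) PySem.Dict.empty (PySem.List.enumerate (w0 :: ws) 0) =
      (if brkGoB (w0 :: ws) (dupGoB (((w0 :: ws).length : Nat) : Int) PySem.Set.empty (PySem.List.enumerate (w0 :: ws) 0))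
            (PySem.List.pyRange 1 (min (dupGoB (((w0 :: ws).length : Nat) : Int) PySem.Set.empty (PySem.List.enumerate (w0 :: ws) 0) + 1) (((w0 :: ws).length : Nat) : Int)) 1)
          < (((w0 :: ws).length : Nat) : Int) then
        [PySem.Int.mod (brkGoB (w0 :: ws) (dupGoB (((w0 :: ws).length : Nat) : Int) PySem.Set.empty (PySem.List.enumerate (w0 :: ws) 0))
            (PySem.List.pyRange 1 (min (dupGoB (((w0 :: ws).length : Nat) : Int) PySem.Set.empty (PySem.List.enumerate (w0 :: ws) 0) + 1) (((w0 :: ws).length : Nat) : Int)) 1)) n + 1,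
         PySem.Int.floordiv (brkGoB (w0 :: ws) (dupGoB (((w0 :: ws).length : Nat) : Int) PySem.Set.empty (PySem.List.enumerate (w0 :: ws) 0))
            (PySem.List.pyRange 1 (min (dupGoB (((w0 :: ws).length : Nat) : Int) PySem.Set.empty (PySem.List.enumerate (w0 :: ws) 0) + 1) (((w0 :: ws).length : Nat) : Int)) 1)) n + 1]
      else [0, 0])
    rw [PySem.List.enumerate_cons, solGoA_cons, dupGoB_cons]
    rw [if_neg (by simp), if_neg (by simp [PySem.Dict.contains_empty]),
      if_neg (show ¬(PySem.Set.contains PySem.Set.empty w0 = true) by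
        simp [PySem.Set.contains_eq_listContains, PySem.Set.empty])]
    have := mainLemma n ws [w0] (PySem.Dict.insert PySem.Dict.empty w0 0)
      (PySem.Set.add PySem.Set.empty w0)
      (by simp)
      (by
        intro x
        rw [PySem.Dict.contains_insert, set_contains_add]
        simp [PySem.Dict.contains_empty, PySem.Set.contains_eq_listContains, PySem.Set.empty])
    simpa using this

-- ===== VERDICT (by name: the statement is the Claim_ definition above) =====
theorem solution_spec : Claim_equal_solution := by
  intro n words _ _
  unfold Spec_solution
  exact solution_eq n words
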